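-- pv_equiv track=rewrite | github.com/vishal-git21/LeetCode | Max_candy.py | no_of_candy
-- ===== SOURCE A (Python) =====
-- def no_of_candy(N,A,B,C):
--     count = 0
--     if(A<B):
--         while(N >= A):
--             count+=1
--             N = N - A + C
--     elif(N-A+C > N-B):
--         while(N >= A):
--             count +=1
--             N = N - A + C
--         while(N >= B):
--             count += 1
--             N = N - B
--     else:
--        while(N >= B):
--             count += 1
--             N = N - B
--     return count
-- ===== SOURCE B (Python) =====
-- def _steps(N, T, d):
--     # iterations of "while N >= T: N -= d" for positive decrement d
--     return 0 if N < T else (N - T) // d + 1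
--
-- def no_of_candy(N, A, B, C):
--     d = A - C
--     if A < B:
--         return _steps(N, A, d)
--     if d < B:
--         k = _steps(N, A, d)
--         return k + _steps(N - k * d, B, B)
--     return _steps(N, B, B)
-- ===== Notes on version B (the rewrite author's own statement) =====
-- stated objective: alternative
-- what changed: Each while loop (a fixed decrement until the guard fails) is replaced by a closed-form iteration count (N-T)//d + 1 and an arithmetic residual, so B is loop-free.
import Mathlib
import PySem

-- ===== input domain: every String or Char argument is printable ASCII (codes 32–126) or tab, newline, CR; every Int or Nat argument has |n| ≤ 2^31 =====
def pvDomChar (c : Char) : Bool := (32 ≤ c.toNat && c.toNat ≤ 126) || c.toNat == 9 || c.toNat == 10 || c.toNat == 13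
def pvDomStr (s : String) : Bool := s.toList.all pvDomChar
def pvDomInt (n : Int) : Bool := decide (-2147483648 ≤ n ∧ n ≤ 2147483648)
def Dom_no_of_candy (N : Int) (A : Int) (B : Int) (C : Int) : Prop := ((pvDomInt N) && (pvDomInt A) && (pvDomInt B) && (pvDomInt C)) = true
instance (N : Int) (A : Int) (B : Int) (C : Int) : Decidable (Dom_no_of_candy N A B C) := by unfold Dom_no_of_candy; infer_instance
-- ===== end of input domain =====

-- B replaces A's decrement-until-guard-fails while loops by closed-form iteration
-- counts ((N-T)//d + 1) and arithmetic residuals: a loop-free alternative algorithm.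

-- ===== PORT A =====
-- "while N >= T: count += 1; N -= d", fuel-bounded for totality (Pre_ guarantees
-- enough fuel on every terminating input); returns (count, N).
def pyLoopA : Nat → Int → Int → Int → Int → Int × Int
  | 0, N, _, _, count => (count, N)
  | fuel + 1, N, T, d, count =>
      if N ≥ T then pyLoopA fuel (N - d) T d (count + 1) else (count, N)

def no_of_candy (N : Int) (A : Int) (B : Int) (C : Int) : Int :=
  let count : Int := 0
  if A < B then
    (pyLoopA (N - A + 1).toNat N A (A - C) count).1
  else if N - A + C > N - B then
    let r1 := pyLoopA (N - A + 1).toNat N A (A - C) count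
    (pyLoopA (r1.2 - B + 1).toNat r1.2 B B r1.1).1
  else
    (pyLoopA (N - B + 1).toNat N B B count).1

-- ===== PORT B =====
def altSteps (N : Int) (T : Int) (d : Int) : Int :=
  if N < T then 0 else PySem.Int.floordiv (N - T) d + 1

def no_of_candy_alt (N : Int) (A : Int) (B : Int) (C : Int) : Int :=
  let d := A - C
  if A < B then altSteps N A d
  else if d < B then
    let k := altSteps N A d
    k + altSteps (N - k * d) B B
  else altSteps N B B

-- ===== PRECONDITION & SPEC =====
-- residual N after A's first loop in the middle branch, in closed form (used only by Pre_)
def pvRes1 (N : Int) (A : Int) (C : Int) : Int :=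
  if N < A then N else N - (PySem.Int.floordiv (N - A) (A - C) + 1) * (A - C)

-- Pre_ excludes exactly the inputs on which A loops forever: a while loop entered
-- (guard initially true) with a non-positive decrement.
def Pre_no_of_candy (N : Int) (A : Int) (B : Int) (C : Int) : Prop :=
  if A < B then (N < A ∨ C < A)
  else if A - C < B then (N < A ∨ C < A) ∧ (pvRes1 N A C < B ∨ 0 < B)
  else (N < B ∨ 0 < B)
instance (N : Int) (A : Int) (B : Int) (C : Int) : Decidable (Pre_no_of_candy N A B C) := by unfold Pre_no_of_candy; infer_instance

def pvWitness_no_of_candy : Int × Int × Int × Int := (10, 3, 2, 1)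

def Spec_no_of_candy (N : Int) (A : Int) (B : Int) (C : Int) (out : Int) : Prop := out = no_of_candy_alt N A B C
instance (N : Int) (A : Int) (B : Int) (C : Int) (out : Int) : Decidable (Spec_no_of_candy N A B C out) := by unfold Spec_no_of_candy; infer_instance

-- ===== CLAIM (what is proved, stated in full; the proofs are below) =====
def Claim_equal_no_of_candy : Prop := ∀ (N : Int) (A : Int) (B : Int) (C : Int), Dom_no_of_candy N A B C → Pre_no_of_candy N A B C → Spec_no_of_candy N A B C (no_of_candy N A B C)

-- ===== LEMMAS AND PROOFS =====

-- the fuel-bounded loop, run with enough fuel on a terminating input, equals the closed form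
lemma pyLoopA_eq (T d : Int) : ∀ (fuel : Nat) (N c : Int),
    (N < T ∨ 0 < d) → (N - T + 1).toNat ≤ fuel →
    pyLoopA fuel N T d c = (c + altSteps N T d, N - altSteps N T d * d) := by
  intro fuel
  induction fuel with
  | zero =>
      intro N c h hf
      have hNT : N < T := by omega
      simp [pyLoopA, altSteps, hNT]
  | succ f ih =>
      intro N c h hf
      by_cases hNT : N < T
      · simp [pyLoopA, altSteps, hNT, not_le.mpr hNT]
      · have hd : 0 < d := by tauto
        have hge : N ≥ T := by omega
        have step : pyLoopA (f + 1) N T d c = pyLoopA f (N - d) T d (c + 1) := by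
          simp [pyLoopA, hge]
        rw [step, ih (N - d) (c + 1) (Or.inr hd) (by omega)]
        have hdiv : PySem.Int.floordiv (N - T) d =
            (if N - d < T then 0 else PySem.Int.floordiv (N - d - T) d + 1) := by
          by_cases h2 : N - d < T
          · simp only [h2, if_true]
            rw [PySem.Int.floordiv_eq_iff_of_pos hd]
            constructor <;> omega
          · simp only [h2, if_false]
            rw [PySem.Int.floordiv_eq_ediv_of_pos hd,
                PySem.Int.floordiv_eq_ediv_of_pos hd]
            have hsplit : N - T = (N - d - T) + 1 * d := by ring
            rw [hsplit, Int.add_mul_ediv_right _ _ (by omega : d ≠ 0)]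
        have hA : altSteps N T d = altSteps (N - d) T d + 1 := by
          by_cases h2 : N - d < T
          · simp [altSteps, not_lt.mpr hge, hdiv, h2]
          · simp [altSteps, not_lt.mpr hge, hdiv, h2]
        rw [hA]
        exact Prod.ext_iff.mpr ⟨by ring, by ring⟩

-- ===== VERDICT (by name: the statement is the Claim_ definition above) =====
theorem no_of_candy_spec : Claim_equal_no_of_candy := by
  intro N A B C _ hpre
  unfold Spec_no_of_candy no_of_candy no_of_candy_alt
  unfold Pre_no_of_candy at hpre
  by_cases h1 : A < B
  · simp only [h1, if_true] at hpre ⊢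
    rw [pyLoopA_eq _ _ _ _ _ (by omega) (le_refl _)]
    simp
  · simp only [h1, if_false] at hpre ⊢
    by_cases h2 : A - C < B
    · simp only [h2, if_true] at hpre
      obtain ⟨hp1, hp2⟩ := hpre
      have hbr : N - A + C > N - B := by omega
      simp only [hbr, if_true, h2]
      have hres : N - altSteps N A (A - C) * (A - C) = pvRes1 N A C := by
        unfold altSteps pvRes1
        by_cases hNA : N < A <;> simp [hNA]
      have e1 : pyLoopA (N - A + 1).toNat N A (A - C) 0
          = (altSteps N A (A - C), pvRes1 N A C) := by
        rw [pyLoopA_eq _ _ _ _ _ (by omega) (le_refl _), hres]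
        simp
      have e2 : pyLoopA ((pvRes1 N A C) - B + 1).toNat (pvRes1 N A C) B B (altSteps N A (A - C))
          = (altSteps N A (A - C) + altSteps (pvRes1 N A C) B B,
             pvRes1 N A C - altSteps (pvRes1 N A C) B B * B) :=
        pyLoopA_eq _ _ _ _ _ (by omega) (le_refl _)
      simp only [e1, e2]
      rw [hres]
    · simp only [h2, if_false] at hpre
      have hbr : ¬ (N - A + C > N - B) := by omega
      simp only [hbr, if_false, h2, if_false]
      rw [pyLoopA_eq _ _ _ _ _ (by omega) (le_refl _)]
      simp
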